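-- pv_equiv track=rewrite | github.com/Haaaam/PS | Programmers/두_개_뽑아서_더하기_re.py | solution
-- ===== SOURCE A (Python) =====
-- def solution(numbers):
--     answer=[]
--     for i in numbers:
--         for j in numbers:
--             # 똑같은 수가 두개 이상일 때
--             if i==j and numbers.count(i)>1:
--                 answer.append(i+j)
--             elif i!=j and i+j not in answer:
--                 answer.append(i+j)
--
--     return sorted(set(answer))
-- ===== SOURCE B (Python) =====
-- def solution(numbers):
--     sums = set()
--     n = len(numbers)
--     for i in range(n):
--         for j in range(i + 1, n):
--             sums.add(numbers[i] + numbers[j])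
--     return sorted(sums)
-- ===== Notes on version B (the rewrite author's own statement) =====
-- stated objective: faster
-- what changed: Replaced the all-pairs value loop with repeated count() and linear 'not in answer' membership scans by an index loop over i<j pairs inserting each sum into a set once, then sorting the set.
import Mathlib
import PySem

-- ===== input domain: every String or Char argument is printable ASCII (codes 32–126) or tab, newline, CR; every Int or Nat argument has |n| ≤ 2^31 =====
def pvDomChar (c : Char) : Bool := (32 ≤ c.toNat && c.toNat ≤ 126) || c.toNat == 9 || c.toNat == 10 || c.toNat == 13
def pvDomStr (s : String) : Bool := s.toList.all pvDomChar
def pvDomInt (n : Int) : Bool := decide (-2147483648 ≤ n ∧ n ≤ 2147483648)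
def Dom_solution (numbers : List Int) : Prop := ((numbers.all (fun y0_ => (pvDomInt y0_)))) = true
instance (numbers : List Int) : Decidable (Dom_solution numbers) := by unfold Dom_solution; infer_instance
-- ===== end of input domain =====

-- B replaces A's O(n^4) value-pair loop (with count() and linear membership scans) by an
-- O(n^2) index loop over i<j pairs inserting each sum into a set once, then sorting the set.

-- ===== PORT A =====
def solution (numbers : List Int) : List Int :=
  let answer : List Int := numbers.foldl (fun acc i =>
    numbers.foldl (fun acc j =>
      if i = j ∧ 1 < PySem.List.count numbers i then acc ++ [i + j]
      else if i ≠ j ∧ (i + j) ∉ acc then acc ++ [i + j]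
      else acc) acc) []
  PySem.List.sorted (PySem.Set.ofList answer) (fun x => x) false

-- ===== PORT B =====
def solution_alt (numbers : List Int) : List Int :=
  let n : Int := PySem.List.len numbers
  let sums : PySem.Set Int := (PySem.List.pyRange 0 n 1).foldl (fun s i =>
    (PySem.List.pyRange (i + 1) n 1).foldl (fun s j =>
      PySem.Set.add s (PySem.List.pyGetD numbers i 0 + PySem.List.pyGetD numbers j 0)) s)
    PySem.Set.empty
  PySem.List.sorted sums (fun x => x) false

-- ===== PRECONDITION & SPEC =====
def Spec_solution (numbers : List Int) (out : List Int) : Prop := out = solution_alt numbers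
instance (numbers : List Int) (out : List Int) : Decidable (Spec_solution numbers out) := by unfold Spec_solution; infer_instance

-- ===== CLAIM (what is proved, stated in full; the proofs are below) =====
def Claim_equal_solution : Prop := ∀ (numbers : List Int), Dom_solution numbers → Spec_solution numbers (solution numbers)

-- ===== LEMMAS AND PROOFS =====

-- membership through a foldl whose step adds elements described by Q
theorem foldl_mem_iff {β : Type} (step : List Int → β → List Int) (Q : β → Int → Prop)
    (h : ∀ acc b x, x ∈ step acc b ↔ x ∈ acc ∨ Q b x) :
    ∀ (l : List β) (acc : List Int) (x : Int),
      x ∈ l.foldl step acc ↔ x ∈ acc ∨ ∃ b ∈ l, Q b x := by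
  intro l
  induction l with
  | nil => simp
  | cons b t ih =>
    intro acc x
    rw [List.foldl_cons, ih, h]
    simp only [List.mem_cons]
    constructor
    · rintro ((hx | hq) | ⟨c, hc, hq⟩)
      · exact Or.inl hx
      · exact Or.inr ⟨b, Or.inl rfl, hq⟩
      · exact Or.inr ⟨c, Or.inr hc, hq⟩
    · rintro (hx | ⟨c, rfl | hc, hq⟩)
      · exact Or.inl (Or.inl hx)
      · exact Or.inl (Or.inr hq)
      · exact Or.inr ⟨c, hc, hq⟩

-- a foldl whose step preserves Nodup preserves Nodup
theorem foldl_nodup {β : Type} (step : List Int → β → List Int)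
    (h : ∀ acc b, acc.Nodup → (step acc b).Nodup) :
    ∀ (l : List β) (acc : List Int), acc.Nodup → (l.foldl step acc).Nodup := by
  intro l
  induction l with
  | nil => exact fun _ hn => hn
  | cons b t ih => intro acc hn; exact ih _ (h acc b hn)

-- the common characterisation: x is a sum of two entries at distinct positions
def IsPairSum (numbers : List Int) (x : Int) : Prop :=
  ∃ p q : Nat, p < q ∧ ∃ u v : Int, numbers[p]? = some u ∧ numbers[q]? = some v ∧ x = u + v

theorem two_idx_of_one_lt_count (l : List Int) (a : Int) (h : 1 < l.count a) :
    ∃ p q : Nat, p < q ∧ l[p]? = some a ∧ l[q]? = some a := by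
  induction l with
  | nil => simp at h
  | cons b t ih =>
    by_cases hb : b = a
    · subst hb
      have ht : b ∈ t := by
        rw [← List.count_pos_iff]
        simp only [List.count_cons_self] at h
        omega
      obtain ⟨q, hq, hget⟩ := List.mem_iff_getElem.mp ht
      exact ⟨0, q + 1, by omega, by simp, by simp [List.getElem?_eq_getElem hq, hget]⟩
    · have : 1 < t.count a := by simp [hb] at h; exact h
      obtain ⟨p, q, hpq, hp, hq⟩ := ih this
      exact ⟨p + 1, q + 1, by omega, by simpa using hp, by simpa using hq⟩

theorem one_lt_count_of_two_idx (l : List Int) (a : Int) (p q : Nat) (hpq : p < q)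
    (hp : l[p]? = some a) (hq : l[q]? = some a) : 1 < l.count a := by
  have hql : q < l.length := by
    by_contra hc
    rw [List.getElem?_eq_none (by omega)] at hq
    simp at hq
  have h1 : a ∈ l.take q := by
    have : (l.take q)[p]? = some a := by
      rw [List.getElem?_take_of_lt hpq]; exact hp
    exact List.mem_of_getElem? this
  have h2 : a ∈ l.drop q := by
    have : (l.drop q)[0]? = some a := by
      rw [List.getElem?_drop]; simpa using hq
    exact List.mem_of_getElem? this
  calc 1 < 1 + 1 := by omega
    _ ≤ (l.take q).count a + (l.drop q).count a := by
        have := List.count_pos_iff.mpr h1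
        have := List.count_pos_iff.mpr h2
        omega
    _ = l.count a := by rw [← List.count_append, List.take_append_drop]

-- A's condition on a pair of VALUES is equivalent to being a sum of two positions
theorem bridge (numbers : List Int) (x : Int) :
    (∃ i ∈ numbers, ∃ j ∈ numbers,
        ((i = j ∧ 1 < PySem.List.count numbers i) ∨ i ≠ j) ∧ x = i + j)
      ↔ IsPairSum numbers x := by
  constructor
  · rintro ⟨i, hi, j, hj, hcond | hne, hx⟩
    · obtain ⟨hij, hcnt⟩ := hcond
      rw [PySem.List.count_eq] at hcnt
      obtain ⟨p, q, hpq, hp, hq⟩ := two_idx_of_one_lt_count numbers i hcnt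
      exact ⟨p, q, hpq, i, i, hp, hq, by omega⟩
    · obtain ⟨p, hpl, hpv⟩ := List.mem_iff_getElem.mp hi
      obtain ⟨q, hql, hqv⟩ := List.mem_iff_getElem.mp hj
      rcases lt_trichotomy p q with h | h | h
      · exact ⟨p, q, h, i, j, by simp [hpl, hpv], by simp [hql, hqv], hx⟩
      · exact absurd (hpv ▸ h ▸ hqv) hne
      · exact ⟨q, p, h, j, i, by simp [hql, hqv], by simp [hpl, hpv], by omega⟩
  · rintro ⟨p, q, hpq, u, v, hp, hq, hx⟩
    have hu : u ∈ numbers := List.mem_of_getElem? hp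
    have hv : v ∈ numbers := List.mem_of_getElem? hq
    by_cases huv : u = v
    · subst huv
      refine ⟨u, hu, u, hu, Or.inl ⟨rfl, ?_⟩, hx⟩
      rw [PySem.List.count_eq]
      exact one_lt_count_of_two_idx numbers u p q hpq hp hq
    · exact ⟨u, hu, v, hv, Or.inr huv, hx⟩

-- membership in A's answer list
theorem memA (numbers : List Int) (x : Int) :
    (x ∈ numbers.foldl (fun acc i =>
        numbers.foldl (fun acc j =>
          if i = j ∧ 1 < PySem.List.count numbers i then acc ++ [i + j]
          else if i ≠ j ∧ (i + j) ∉ acc then acc ++ [i + j]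
          else acc) acc) [])
      ↔ ∃ i ∈ numbers, ∃ j ∈ numbers,
          ((i = j ∧ 1 < PySem.List.count numbers i) ∨ i ≠ j) ∧ x = i + j := by
  rw [foldl_mem_iff _
      (fun i x => ∃ j ∈ numbers,
        ((i = j ∧ 1 < PySem.List.count numbers i) ∨ i ≠ j) ∧ x = i + j)
      (fun acc i x => by
        rw [foldl_mem_iff _
            (fun j x => ((i = j ∧ 1 < PySem.List.count numbers i) ∨ i ≠ j) ∧ x = i + j)
            (fun acc j x => by
              split_ifs with h1 h2
              · simp only [List.mem_append, List.mem_singleton]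
                tauto
              · simp only [List.mem_append, List.mem_singleton]
                tauto
              · rw [not_and_or, not_not] at h2
                constructor
                · tauto
                · rintro (hx | ⟨hc | hc, hx⟩)
                  · exact hx
                  · exact absurd hc h1
                  · rcases h2 with h2 | h2
                    · exact absurd h2 hc
                    · exact hx ▸ (not_not.mp h2))])]
  simp

-- total-index view of numbers[i] for an in-range nonnegative Int index
theorem pyGetD_idx (xs : List Int) (i : Int) (h0 : 0 ≤ i) (h : i.toNat < xs.length) :
    PySem.List.pyGetD xs i 0 = xs[i.toNat] := by
  have hi : i < (xs.length : Int) := by omega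
  simp [PySem.List.pyGetD, PySem.List.pyGet?, PySem.List.pyIdx?, h0, hi]

-- membership in B's set of sums
theorem memB (numbers : List Int) (x : Int) :
    (x ∈ (PySem.List.pyRange 0 (PySem.List.len numbers) 1).foldl (fun s i =>
        (PySem.List.pyRange (i + 1) (PySem.List.len numbers) 1).foldl (fun s j =>
          PySem.Set.add s (PySem.List.pyGetD numbers i 0 + PySem.List.pyGetD numbers j 0)) s)
        PySem.Set.empty)
      ↔ IsPairSum numbers x := by
  rw [foldl_mem_iff _
      (fun i x => ∃ j ∈ PySem.List.pyRange (i + 1) (PySem.List.len numbers) 1,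
        x = PySem.List.pyGetD numbers i 0 + PySem.List.pyGetD numbers j 0)
      (fun acc i x => by
        rw [foldl_mem_iff _
            (fun j x => x = PySem.List.pyGetD numbers i 0 + PySem.List.pyGetD numbers j 0)
            (fun acc j x => by rw [PySem.Set.mem_add])])]
  constructor
  · rintro (h | ⟨i, hi, j, hj, hx⟩)
    · simp [PySem.Set.empty] at h
    · rw [PySem.List.mem_pyRange_one] at hi hj
      simp only [PySem.List.len_eq] at hi hj
      have hiN : i.toNat < numbers.length := by omega
      have hjN : j.toNat < numbers.length := by omega
      refine ⟨i.toNat, j.toNat, by omega, numbers[i.toNat], numbers[j.toNat],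
        List.getElem?_eq_getElem hiN, List.getElem?_eq_getElem hjN, ?_⟩
      rw [hx, pyGetD_idx numbers i (by omega) hiN, pyGetD_idx numbers j (by omega) hjN]
  · rintro ⟨p, q, hpq, u, v, hp, hq, hx⟩
    have hql : q < numbers.length := by
      by_contra hc
      rw [List.getElem?_eq_none (by omega)] at hq
      simp at hq
    refine Or.inr ⟨(p : Int), ?_, (q : Int), ?_, ?_⟩
    · rw [PySem.List.mem_pyRange_one]; simp; omega
    · rw [PySem.List.mem_pyRange_one]; simp; omega
    · rw [pyGetD_idx numbers p (by omega) (by simpa using by omega),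
          pyGetD_idx numbers q (by omega) (by simpa using hql)]
      simp only [Int.toNat_natCast]
      rw [List.getElem?_eq_getElem (by omega : p < numbers.length)] at hp
      rw [List.getElem?_eq_getElem hql] at hq
      rw [hx, Option.some_inj.mp hp, Option.some_inj.mp hq]

-- ===== VERDICT (by name: the statement is the Claim_ definition above) =====
theorem solution_spec : Claim_equal_solution := by
  intro numbers _
  unfold Spec_solution solution solution_alt
  apply PySem.List.sorted_eq_sorted_of_perm _ _ _ (fun a b => id)
  apply (List.perm_ext_iff_of_nodup (PySem.Set.nodup_ofList _) ?_).mpr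
  · intro x
    rw [PySem.Set.mem_ofList, memA, bridge, ← memB]
  · exact foldl_nodup _
      (fun acc i => foldl_nodup _ (fun acc j hn => PySem.Set.nodup_add _ _ hn) _ acc)
      _ _ List.nodup_nil
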